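-- pv_equiv track=rewrite | github.com/senseielectrico/smart-search-pro | core/security.py | sanitize_sql_input
-- ===== SOURCE A (Python) =====
-- def sanitize_sql_input(value: str, max_length: int = 1000, escape_percent: bool = True) -> str:
--     """
--     Sanitize input to prevent SQL injection.
--
--     Args:
--         value: Value to sanitize
--         max_length: Maximum allowed length
--         escape_percent: If True, escape % (SQL wildcard)
--
--     Returns:
--         Sanitized string
--
--     Raises:
--         ValueError: If input contains dangerous patterns or is too long
--     """
--     if not value:
--         return ""
--
--     # Validate length
--     if len(value) > max_length:
--         raise ValueError(f"Input too long: {len(value)} > {max_length}")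
--
--     # Remove control characters (except spaces and tabs)
--     sanitized = ''.join(
--         char for char in value
--         if char.isprintable() or char in (' ', '\t')
--     )
--
--     # Escape single quotes by doubling them (SQL standard)
--     sanitized = sanitized.replace("'", "''")
--
--     # Escape SQL LIKE special characters
--     # In Windows Search, these must be escaped with []
--     sanitized = sanitized.replace('[', '[[]')  # Escape [ first
--
--     # Escape % only if specified (allows preserving wildcards)
--     if escape_percent:
--         sanitized = sanitized.replace('%', '[%]')
--
--     sanitized = sanitized.replace('_', '[_]')
--
--     return sanitized
-- ===== SOURCE B (Python) =====
-- def sanitize_sql_input(value: str, max_length: int = 1000, escape_percent: bool = True) -> str: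
--     """Single pass over value: drop non-printables (except space/tab), escape via a per-char map."""
--     if not value:
--         return ""
--     if len(value) > max_length:
--         raise ValueError(f"Input too long: {len(value)} > {max_length}")
--     esc = {"'": "''", '[': '[[]', '_': '[_]'}
--     if escape_percent:
--         esc['%'] = '[%]'
--     out = []
--     for ch in value:
--         if ch.isprintable() or ch in (' ', '\t'):
--             out.append(esc.get(ch, ch))
--     return ''.join(out)
-- ===== Notes on version B (the rewrite author's own statement) =====
-- stated objective: alternative
-- what changed: Replaces A's five linear scans (a filtering join followed by four successive str.replace passes over growing intermediate strings) with one single pass that filters and escapes each character via a per-char mapping.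
import Mathlib
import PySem

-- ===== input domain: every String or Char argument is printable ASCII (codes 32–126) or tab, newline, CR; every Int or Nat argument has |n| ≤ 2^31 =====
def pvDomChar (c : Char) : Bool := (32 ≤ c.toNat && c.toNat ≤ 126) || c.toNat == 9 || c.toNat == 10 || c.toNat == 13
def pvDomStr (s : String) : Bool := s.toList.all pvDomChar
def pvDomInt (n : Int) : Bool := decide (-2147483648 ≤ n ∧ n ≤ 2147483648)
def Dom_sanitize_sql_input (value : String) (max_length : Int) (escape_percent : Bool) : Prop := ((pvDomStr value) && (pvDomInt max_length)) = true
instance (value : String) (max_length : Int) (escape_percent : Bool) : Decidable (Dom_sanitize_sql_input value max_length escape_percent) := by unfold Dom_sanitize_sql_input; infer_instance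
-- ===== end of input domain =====

-- B replaces A’s filter-join plus four successive str.replace scans with a single
-- per-character pass using an escape mapping (objective: alternative one-pass decomposition).


-- char.isprintable() or char in (' ', '\t') — exact on Dom's chars (printable ASCII 32–126 plus tab/newline/CR:
-- there isprintable() is exactly 32 ≤ code ≤ 126)
def pyKeepChar (c : Char) : Bool := (32 ≤ c.toNat && c.toNat ≤ 126) || c = ' ' || c = '\t'

-- ===== PORT A =====
def sanitize_sql_input (value : String) (max_length : Int) (escape_percent : Bool) : String :=
  if value = "" then "" else
  -- length check excluded by Pre_ (raises ValueError when len(value) > max_length)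
  let sanitized := String.ofList (value.toList.filter pyKeepChar)
  let sanitized := PySem.Str.replace sanitized "'" "''"
  let sanitized := PySem.Str.replace sanitized "[" "[[]"
  let sanitized := if escape_percent then PySem.Str.replace sanitized "%" "[%]" else sanitized
  let sanitized := PySem.Str.replace sanitized "_" "[_]"
  sanitized

-- ===== PORT B =====
-- esc.get(ch, ch), with '%' present only when escape_percent
def escPiece (escape_percent : Bool) (c : Char) : List Char :=
  if c = '\'' then ['\'', '\'']
  else if c = '[' then ['[', '[', ']']
  else if escape_percent && c = '%' then ['[', '%', ']']
  else if c = '_' then ['[', '_', ']']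
  else [c]

def sanitize_sql_input_alt (value : String) (max_length : Int) (escape_percent : Bool) : String :=
  if value = "" then "" else
  String.ofList (value.toList.flatMap (fun c => if pyKeepChar c then escPiece escape_percent c else []))

-- ===== PRECONDITION & SPEC =====
-- Pre_ excludes exactly the inputs where A raises ValueError: a nonempty value longer than max_length.
def Pre_sanitize_sql_input (value : String) (max_length : Int) (escape_percent : Bool) : Prop :=
  value = "" ∨ (value.toList.length : Int) ≤ max_length
instance (value : String) (max_length : Int) (escape_percent : Bool) : Decidable (Pre_sanitize_sql_input value max_length escape_percent) := by unfold Pre_sanitize_sql_input; infer_instance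
def pvWitness_sanitize_sql_input : String × Int × Bool := ("it's 100%_[x]", 1000, true)

def Spec_sanitize_sql_input (value : String) (max_length : Int) (escape_percent : Bool) (out : String) : Prop := out = sanitize_sql_input_alt value max_length escape_percent
instance (value : String) (max_length : Int) (escape_percent : Bool) (out : String) : Decidable (Spec_sanitize_sql_input value max_length escape_percent out) := by unfold Spec_sanitize_sql_input; infer_instance

-- ===== CLAIM (what is proved, stated in full; the proofs are below) =====
def Claim_equal_sanitize_sql_input : Prop := ∀ (value : String) (max_length : Int) (escape_percent : Bool), Dom_sanitize_sql_input value max_length escape_percent → Pre_sanitize_sql_input value max_length escape_percent → Spec_sanitize_sql_input value max_length escape_percent (sanitize_sql_input value max_length escape_percent)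

-- ===== LEMMAS AND PROOFS =====

-- A's four str.replace targets, as per-char maps (proof helpers)
def eqQuote (x : Char) : List Char := if x = '\'' then ['\'', '\''] else [x]
def eqBracket (x : Char) : List Char := if x = '[' then ['[', '[', ']'] else [x]
def eqPercent (x : Char) : List Char := if x = '%' then ['[', '%', ']'] else [x]
def eqUnder (x : Char) : List Char := if x = '_' then ['[', '_', ']'] else [x]

-- single-character str.replace is a per-character flatMap
lemma replace_go_single (c : Char) (new : List Char) :
    ∀ (fuel : Nat) (l acc : List Char), l.length ≤ fuel →
      PySem.Chars.replace.go [c] new fuel l acc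
        = acc.reverse ++ l.flatMap (fun x => if x = c then new else [x]) := by
  intro fuel
  induction fuel with
  | zero =>
    intro l acc h
    have : l = [] := List.eq_nil_of_length_eq_zero (Nat.le_zero.mp h)
    subst this
    simp [PySem.Chars.replace.go]
  | succ n ih =>
    intro l acc h
    cases l with
    | nil => simp [PySem.Chars.replace.go]
    | cons x t =>
      by_cases hx : x = c
      · subst hx
        have hp : List.isPrefixOf [x] (x :: t) = true := by simp [List.isPrefixOf]
        rw [PySem.Chars.replace.go]
        simp only [hp, if_true, List.length_cons, List.drop_succ_cons, List.length_nil, List.drop_zero]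
        rw [ih t _ (by simpa using Nat.succ_le_succ_iff.mp h)]
        simp
      · have hp : List.isPrefixOf [c] (x :: t) = false := by
          simp [List.isPrefixOf]
          exact fun h' => absurd h'.symm hx
        rw [PySem.Chars.replace.go]
        simp only [hp, Bool.false_eq_true, if_false]
        rw [ih t _ (Nat.succ_le_succ_iff.mp h)]
        simp [hx]

lemma str_replace_single (s : String) (old new : String) (c : Char) (ns : List Char)
    (h1 : old.toList = [c]) (h2 : new.toList = ns) :
    (PySem.Str.replace s old new).toList
      = s.toList.flatMap (fun x => if x = c then ns else [x]) := by
  simp only [PySem.Str.replace, h1, h2, String.toList_ofList]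
  simp only [PySem.Chars.replace, List.isEmpty_cons, Bool.false_eq_true, if_false]
  simpa using replace_go_single c ns s.toList.length s.toList [] (le_refl _)

-- the per-char composition of A's escapes equals B's per-char piece, for a kept char
lemma head_false (x : Char) :
    ((eqQuote x).flatMap eqBracket).flatMap eqUnder = escPiece false x := by
  by_cases h1 : x = '\''
  · subst h1; decide
  all_goals by_cases h2 : x = '['
  · subst h2; decide
  all_goals by_cases h4 : x = '_'
  · subst h4; decide
  · simp [eqQuote, eqBracket, eqUnder, escPiece, h1, h2, h4]

lemma head_true (x : Char) :
    (((eqQuote x).flatMap eqBracket).flatMap eqPercent).flatMap eqUnder = escPiece true x := by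
  by_cases h1 : x = '\''
  · subst h1; decide
  all_goals by_cases h2 : x = '['
  · subst h2; decide
  all_goals by_cases h3 : x = '%'
  · subst h3; decide
  all_goals by_cases h4 : x = '_'
  · subst h4; decide
  · simp [eqQuote, eqBracket, eqPercent, eqUnder, escPiece, h1, h2, h3, h4]

lemma chain_false (l : List Char) :
    (((l.filter pyKeepChar).flatMap eqQuote).flatMap eqBracket).flatMap eqUnder
      = l.flatMap (fun c => if pyKeepChar c then escPiece false c else []) := by
  induction l with
  | nil => rfl
  | cons x t ih =>
    by_cases h : pyKeepChar x
    · simp only [List.filter_cons, h, if_true, List.flatMap_cons, List.flatMap_append, ih]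
      rw [head_false x]
    · simp [List.filter_cons, h, ih]

lemma chain_true (l : List Char) :
    ((((l.filter pyKeepChar).flatMap eqQuote).flatMap eqBracket).flatMap eqPercent).flatMap eqUnder
      = l.flatMap (fun c => if pyKeepChar c then escPiece true c else []) := by
  induction l with
  | nil => rfl
  | cons x t ih =>
    by_cases h : pyKeepChar x
    · simp only [List.filter_cons, h, if_true, List.flatMap_cons, List.flatMap_append, ih]
      rw [head_true x]
    · simp [List.filter_cons, h, ih]

-- ===== VERDICT (by name: the statement is the Claim_ definition above) =====
theorem sanitize_sql_input_spec : Claim_equal_sanitize_sql_input := by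
  intro value max_length escape_percent _ _
  unfold Spec_sanitize_sql_input sanitize_sql_input sanitize_sql_input_alt
  by_cases hv : value = ""
  · simp [hv]
  · simp only [hv, if_false]
    cases escape_percent with
    | false =>
      have h : (PySem.Str.replace (PySem.Str.replace (PySem.Str.replace
            (String.ofList (value.toList.filter pyKeepChar)) "'" "''") "[" "[[]") "_" "[_]").toList
          = value.toList.flatMap (fun c => if pyKeepChar c then escPiece false c else []) := by
        rw [str_replace_single _ _ _ '_' ['[', '_', ']'] rfl rfl,
            str_replace_single _ _ _ '[' ['[', '[', ']'] rfl rfl,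
            str_replace_single _ _ _ '\'' ['\'', '\''] rfl rfl,
            String.toList_ofList]
        exact chain_false value.toList
      simp only [Bool.false_eq_true, if_false]
      have := congrArg String.ofList h
      rwa [String.ofList_toList] at this
    | true =>
      have h : (PySem.Str.replace (PySem.Str.replace (PySem.Str.replace (PySem.Str.replace
            (String.ofList (value.toList.filter pyKeepChar)) "'" "''") "[" "[[]") "%" "[%]") "_" "[_]").toList
          = value.toList.flatMap (fun c => if pyKeepChar c then escPiece true c else []) := by
        rw [str_replace_single _ _ _ '_' ['[', '_', ']'] rfl rfl,
            str_replace_single _ _ _ '%' ['[', '%', ']'] rfl rfl,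
            str_replace_single _ _ _ '[' ['[', '[', ']'] rfl rfl,
            str_replace_single _ _ _ '\'' ['\'', '\''] rfl rfl,
            String.toList_ofList]
        exact chain_true value.toList
      simp only [if_true]
      have := congrArg String.ofList h
      rwa [String.ofList_toList] at this
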